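-- pv_equiv track=rewrite | github.com/nishanthegde/bitesofpy | pybites_bite373/reverse_letters.py | reverse_letters
-- ===== SOURCE A (Python) =====
-- def reverse_letters(string: str) -> str:
--     """Reverse letters in a string but keep the order of the non-letters the same"""
--     lstring = list(string)
--     na_pos = []
--     for i in range(len(lstring)):
--         if not lstring[i].isalpha():
--             na_pos.append(i)
--
--     rev_lstring = [i for i in lstring if i.isalpha()][::-1]
--
--     for p in na_pos:
--         rev_lstring.insert(p, lstring[p])
--
--     return "".join(rev_lstring)
-- ===== SOURCE B (Python) =====
-- def reverse_letters(string: str) -> str: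
--     """Reverse letters in a string but keep the order of the non-letters the same"""
--     letters = iter(reversed([c for c in string if c.isalpha()]))
--     return "".join(next(letters) if c.isalpha() else c for c in string)
-- ===== Notes on version B (the rewrite author's own statement) =====
-- stated objective: alternative
-- what changed: Replaces the collect-indices-then-repeated-list.insert reconstruction (each insert shifts a growing list) with a single pass that emits each character directly, drawing alphabetic positions from a reversed-letters iterator.
import Mathlib
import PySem

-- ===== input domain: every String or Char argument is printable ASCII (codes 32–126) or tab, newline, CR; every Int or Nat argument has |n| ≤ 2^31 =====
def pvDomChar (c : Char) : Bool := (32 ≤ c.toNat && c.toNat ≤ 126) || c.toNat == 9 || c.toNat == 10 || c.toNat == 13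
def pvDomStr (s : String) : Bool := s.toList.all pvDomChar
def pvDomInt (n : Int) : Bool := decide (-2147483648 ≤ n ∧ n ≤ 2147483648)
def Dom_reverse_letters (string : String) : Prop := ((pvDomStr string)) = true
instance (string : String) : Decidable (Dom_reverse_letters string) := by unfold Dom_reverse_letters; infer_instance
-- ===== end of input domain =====

-- B replaces A's collect-indices-then-repeated-list.insert reconstruction with a single pass
-- that emits each character directly, drawing alphabetic positions from the reversed-letters
-- supply (objective: alternative).

-- ===== PORT A =====
def reverse_letters (string : String) : String :=
  let lstring := string.toList
  -- for i in range(len(lstring)): if not lstring[i].isalpha(): na_pos.append(i)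
  -- (lstring[i] ported as pyGetD with an unused default: i ∈ range(len(lstring)) is always in range)
  let na_pos : List Int :=
    (PySem.List.pyRange 0 (PySem.List.len lstring) 1).foldl
      (fun acc i => if ¬ (PySem.Chars.isalpha (PySem.List.pyGetD lstring i ' ')) = true
                    then acc ++ [i] else acc) []
  -- [i for i in lstring if i.isalpha()][::-1]
  let rev_lstring :=
    (PySem.List.slice? (lstring.filter (fun c => PySem.Chars.isalpha c)) none none (-1)).getD []
  -- for p in na_pos: rev_lstring.insert(p, lstring[p])
  let final := na_pos.foldl
    (fun acc p => PySem.List.insert acc p (PySem.List.pyGetD lstring p ' ')) rev_lstring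
  -- "".join(rev_lstring)
  String.ofList (PySem.Chars.join [] (final.map (fun c => [c])))

-- ===== PORT B =====
-- the generator 'next(letters) if c.isalpha() else c for c in string': ls is the iterator's
-- remaining elements; the [] branch under isalpha (StopIteration) is never reached, since the
-- supply holds exactly one letter per alphabetic character of cs.
def pvFill (ls : List Char) (cs : List Char) : List Char :=
  match cs, ls with
  | [], _ => []
  | c :: rest, ls =>
      if PySem.Chars.isalpha c = true then
        match ls with
        | l :: ls' => l :: pvFill ls' rest
        | [] => []
      else c :: pvFill ls rest

def reverse_letters_alt (string : String) : String :=
  -- letters = iter(reversed([c for c in string if c.isalpha()]))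
  let letters := (string.toList.filter (fun c => PySem.Chars.isalpha c)).reverse
  -- "".join(next(letters) if c.isalpha() else c for c in string)
  String.ofList (PySem.Chars.join [] ((pvFill letters string.toList).map (fun c => [c])))

-- ===== PRECONDITION & SPEC =====
def Spec_reverse_letters (string : String) (out : String) : Prop := out = reverse_letters_alt string
instance (string : String) (out : String) : Decidable (Spec_reverse_letters string out) := by unfold Spec_reverse_letters; infer_instance

-- ===== CLAIM (what is proved, stated in full; the proofs are below) =====
def Claim_equal_reverse_letters : Prop := ∀ (string : String), Dom_reverse_letters string → Spec_reverse_letters string (reverse_letters string)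

-- ===== LEMMAS AND PROOFS =====

/-- The non-alphabetic positions of `cs`, offset by `k` (A's `na_pos` for the suffix `cs`). -/
def pvNaPos (k : Nat) (cs : List Char) : List Int :=
  match cs with
  | [] => []
  | c :: rest =>
      if PySem.Chars.isalpha c = true then pvNaPos (k + 1) rest
      else (k : Int) :: pvNaPos (k + 1) rest

lemma pvNaPos_eq_filter_pyRange (cs0 : List Char) :
    ∀ (k : Nat) (cs : List Char), cs = cs0.drop k →
      (PySem.List.pyRange (k : Int) ((k : Int) + cs.length) 1).filter
        (fun i => decide (¬ (PySem.Chars.isalpha (PySem.List.pyGetD cs0 i ' ')) = true))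
      = pvNaPos k cs := by
  intro k cs
  induction cs generalizing k with
  | nil =>
      intro _
      simp [pvNaPos, PySem.List.pyRange_one_eq_nil (le_refl (k : Int))]
  | cons c rest ih =>
      intro hk
      have hget : cs0[k]? = some c := by
        have : (cs0.drop k)[0]? = some c := by rw [← hk]; rfl
        simpa [List.getElem?_drop] using this
      have hgetD : cs0.getD k ' ' = c := by simp [List.getD, hget]
      have hrest : rest = cs0.drop (k + 1) := by
        have := congrArg List.tail hk
        simpa [List.tail_drop] using this
      have hlt : (k : Int) < (k : Int) + ((c :: rest).length : Int) := by
        simp only [List.length_cons]; push_cast; omega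
      have ihh := ih (k + 1) hrest
      push_cast at ihh
      have hb : ((c :: rest).length : Int) = (rest.length : Int) + 1 := by
        simp only [List.length_cons]; push_cast; ring
      rw [PySem.List.pyRange_one_cons hlt, List.filter_cons, hb,
        show (k : Int) + ((rest.length : Int) + 1) = (k : Int) + 1 + rest.length by ring]
      have hc : PySem.List.pyGetD cs0 ((k : Nat) : Int) ' ' = c := by
        rw [PySem.List.pyGetD_natCast]; simp [List.getD, hget]
      by_cases ha : PySem.Chars.isalpha c = true
      · rw [pvNaPos, if_pos ha, ← ihh]
        simp [hc, ha]
      · rw [pvNaPos, if_neg ha, ← ihh]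
        simp [hc, ha]

/-- A's insertion loop, started on `done ++ ls` where `done` is the already-final prefix of
length `k` and `ls` the remaining reversed-letter supply, produces `done ++ pvFill ls cs`. -/
lemma pvInsert_loop (cs0 : List Char) :
    ∀ (cs : List Char) (done ls : List Char),
      cs = cs0.drop done.length →
      ls.length = (cs.filter (fun c => PySem.Chars.isalpha c)).length →
      (pvNaPos done.length cs).foldl
        (fun acc p => PySem.List.insert acc p (PySem.List.pyGetD cs0 p ' ')) (done ++ ls)
      = done ++ pvFill ls cs := by
  intro cs
  induction cs with
  | nil =>
      intro done ls _ hlen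
      have : ls = [] := by
        simpa using List.eq_nil_of_length_eq_zero (by simpa using hlen)
      simp [pvNaPos, pvFill, this]
  | cons c rest ih =>
      intro done ls hk hlen
      have hget : cs0[done.length]? = some c := by
        have : (cs0.drop done.length)[0]? = some c := by rw [← hk]; rfl
        simpa [List.getElem?_drop] using this
      have hgetD : cs0.getD done.length ' ' = c := by simp [List.getD, hget]
      have hrest : rest = cs0.drop (done.length + 1) := by
        have := congrArg List.tail hk
        simpa [List.tail_drop] using this
      by_cases ha : PySem.Chars.isalpha c = true
      · -- alphabetic: supply is nonempty, consume its head
        have hlen' : ls.length = (rest.filter (fun c => PySem.Chars.isalpha c)).length + 1 := by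
          simpa [List.filter_cons, ha] using hlen
        cases ls with
        | nil => simp at hlen'
        | cons l ls' =>
            have hsplit : done ++ l :: ls' = (done ++ [l]) ++ ls' := by simp
            have ihh := ih (done ++ [l]) ls' (by simpa using hrest) (by simpa using hlen')
            simp only [List.length_append, List.length_cons, List.length_nil, Nat.zero_add] at ihh
            rw [pvNaPos, if_pos ha, hsplit, ihh]
            simp [pvFill, ha]
      · -- non-alphabetic: insert c at position done.length
        have hle : done.length ≤ (done ++ ls).length := by simp
        have ihh := ih (done ++ [c]) ls (by simpa using hrest)
          (by simpa [List.filter_cons, ha] using hlen)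
        simp only [List.length_append, List.length_cons, List.length_nil, Nat.zero_add] at ihh
        rw [pvNaPos, if_neg ha, List.foldl_cons, PySem.List.pyGetD_natCast, hgetD,
          PySem.List.insert_natCast _ _ _ hle,
          List.take_left, List.drop_left,
          show done ++ c :: ls = (done ++ [c]) ++ ls by simp, ihh]
        simp [pvFill, ha]

-- ===== VERDICT (by name: the statement is the Claim_ definition above) =====
theorem reverse_letters_spec : Claim_equal_reverse_letters := by
  intro s _
  unfold Spec_reverse_letters reverse_letters reverse_letters_alt
  simp only [PySem.List.slice?_none_none_neg_one, Option.getD_some, PySem.List.len_eq]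
  rw [PySem.List.foldl_append_ite_eq_filter
        (fun i => ¬ (PySem.Chars.isalpha (PySem.List.pyGetD s.toList i ' ')) = true)]
  have hna := pvNaPos_eq_filter_pyRange s.toList 0 s.toList (by simp)
  simp only [Nat.cast_zero, Int.zero_add, List.nil_append] at hna ⊢
  have hins := pvInsert_loop s.toList s.toList []
      ((s.toList.filter (fun c => PySem.Chars.isalpha c)).reverse) (by simp) (by simp)
  simp only [List.length_nil, List.nil_append] at hins
  rw [hna, hins]
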